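-- pv_equiv track=rewrite | github.com/kmus1232/Algorithm | kakao_불량사용자_recursive.py | solution
-- ===== SOURCE A (Python) =====
-- from copy import deepcopy
--
-- def match(bid, uid):
--     if len(uid) != len(bid):
--         return False
--     for i in range(len(uid)):
--         if bid[i] == '*' or bid[i] == uid[i]:
--             continue
--         else:
--             return False
--     return True
--
-- def find_possible_cases(match_list_arr):
--     if not match_list_arr:
--         return [[]]
--
--     result = []
--     for case in match_list_arr[0]:
--         copy_arr = deepcopy(match_list_arr[1:])
--         for match_list in copy_arr:
--             if case in match_list:
--                 match_list.remove(case)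
--         for possible_case in find_possible_cases(copy_arr):
--             result.append([case] + possible_case)
--     return result
--
-- def solution(user_id, banned_id):
--     match_list_arr = []
--     for bid in banned_id:
--         match_list = []
--         for uid in user_id:
--             if match(bid, uid):
--                 match_list.append(uid)
--         match_list_arr.append(match_list)
--
--     possible_cases = find_possible_cases(match_list_arr)
--     result = set([tuple(sorted(case)) for case in possible_cases])
--     return len(result)
-- ===== SOURCE B (Python) =====
-- def match(bid, uid):
--     if len(uid) != len(bid):
--         return False
--     for i in range(len(uid)):
--         if bid[i] == '*' or bid[i] == uid[i]:
--             continue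
--         else:
--             return False
--     return True
--
-- def solution(user_id, banned_id):
--     # breadth-first product with a multiplicity filter instead of recursive
--     # backtracking with deepcopy/remove
--     partial = [[]]
--     for bid in banned_id:
--         cands = [uid for uid in user_id if match(bid, uid)]
--         partial = [p + [u] for p in partial for u in cands
--                    if p.count(u) < cands.count(u)]
--     result = set(tuple(sorted(p)) for p in partial)
--     return len(result)
-- ===== Notes on version B (the rewrite author's own statement) =====
-- stated objective: simpler
-- what changed: Replaces the recursive backtracking that deepcopies the remaining candidate lists and removes used users with a single iterative breadth-first fold that extends partial assignments and filters by multiplicity (p.count(u) < cands.count(u)), no recursion and no copying.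
import Mathlib
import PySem

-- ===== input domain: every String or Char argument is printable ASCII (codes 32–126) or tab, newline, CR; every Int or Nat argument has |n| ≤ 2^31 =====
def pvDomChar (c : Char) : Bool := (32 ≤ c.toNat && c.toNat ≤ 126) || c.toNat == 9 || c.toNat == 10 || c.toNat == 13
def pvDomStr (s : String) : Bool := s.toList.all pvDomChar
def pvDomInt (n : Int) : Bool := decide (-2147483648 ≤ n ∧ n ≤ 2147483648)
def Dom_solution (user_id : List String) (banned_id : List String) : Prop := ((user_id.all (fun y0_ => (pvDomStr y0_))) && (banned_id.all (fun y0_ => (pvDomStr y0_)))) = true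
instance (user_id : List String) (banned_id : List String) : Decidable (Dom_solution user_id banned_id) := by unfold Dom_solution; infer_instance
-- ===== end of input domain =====

-- B replaces A's recursive deepcopy/remove backtracking with one iterative fold
-- filtering extensions by multiplicity; objective: simpler (no recursion, no copying).

-- ===== PORT A =====
-- match(bid, uid): the early-return loop over range(len(uid)) is the `all` of its body
def pymatch (bid : String) (uid : String) : Bool :=
  let b := bid.toList
  let u := uid.toList
  if u.length ≠ b.length then false
  else (PySem.List.pyRange 0 (u.length : Int) 1).all (fun i =>
    (PySem.List.pyGetD b i ' ' == '*') || (PySem.List.pyGetD b i ' ' == PySem.List.pyGetD u i ' '))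

-- find_possible_cases: `match_list.remove(case)` is guarded by `case in match_list`
def fpc : List (List String) → List (List String)
  | [] => [[]]
  | l :: ls => l.flatMap (fun case =>
      (fpc (ls.map (fun ml => if case ∈ ml then ml.erase case else ml))).map
        (fun pc => case :: pc))
  termination_by ls => ls.length
  decreasing_by simp

def solution (user_id : List String) (banned_id : List String) : Int :=
  let match_list_arr := banned_id.foldl (fun acc bid =>
    acc ++ [user_id.foldl (fun ml uid => if pymatch bid uid then ml ++ [uid] else ml) []]) []
  let possible_cases := fpc match_list_arr
  let result := PySem.Set.ofList (possible_cases.map (fun c => PySem.List.sorted c (fun x => x) false))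
  (result.length : Int)

-- ===== PORT B =====
def solution_alt (user_id : List String) (banned_id : List String) : Int :=
  let part := banned_id.foldl (fun part bid =>
    let cands := user_id.filter (fun uid => pymatch bid uid)
    part.flatMap (fun p =>
      (cands.filter (fun u => p.count u < cands.count u)).map (fun u => p ++ [u]))) [[]]
  ((PySem.Set.ofList (part.map (fun p => PySem.List.sorted p (fun x => x) false))).length : Int)

-- ===== PRECONDITION & SPEC =====
def Spec_solution (user_id : List String) (banned_id : List String) (out : Int) : Prop := out = solution_alt user_id banned_id
instance (user_id : List String) (banned_id : List String) (out : Int) : Decidable (Spec_solution user_id banned_id out) := by unfold Spec_solution; infer_instance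

-- ===== CLAIM (what is proved, stated in full; the proofs are below) =====
def Claim_equal_solution : Prop := ∀ (user_id : List String) (banned_id : List String), Dom_solution user_id banned_id → Spec_solution user_id banned_id (solution user_id banned_id)

-- ===== LEMMAS AND PROOFS =====

-- one step of B's fold
def bstep (part : List (List String)) (l : List String) : List (List String) :=
  part.flatMap (fun p => (l.filter (fun u => p.count u < l.count u)).map (fun u => p ++ [u]))

-- all extensions of a partial assignment p through the remaining lists ls
def sfx : List (List String) → List String → List (List String)
  | [], p => [p]
  | l :: ls, p => (l.filter (fun u => p.count u < l.count u)).flatMap (fun u => sfx ls (p ++ [u]))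

def removeCounts (p : List String) (l : List String) : List String :=
  p.foldl (fun acc y => acc.erase y) l

theorem if_erase (x : String) (ml : List String) :
    (if x ∈ ml then ml.erase x else ml) = ml.erase x := by
  split
  · rfl
  · exact (List.erase_of_not_mem (by assumption)).symm

theorem fpc_cons (l : List String) (ls : List (List String)) :
    fpc (l :: ls) = l.flatMap (fun c => (fpc (ls.map (fun ml => ml.erase c))).map (fun pc => c :: pc)) := by
  rw [fpc]
  simp only [if_erase]

theorem count_removeCounts (p l : List String) (x : String) :
    (removeCounts p l).count x = l.count x - p.count x := by
  induction p generalizing l with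
  | nil => simp [removeCounts]
  | cons y p ih =>
      simp only [removeCounts, List.foldl_cons] at *
      rw [ih, List.count_erase, List.count_cons]
      rcases eq_or_ne x y with rfl | h
      · simp; omega
      · simp [Ne.symm h]

theorem removeCounts_append (p : List String) (u : String) (l : List String) :
    removeCounts (p ++ [u]) l = (removeCounts p l).erase u := by
  simp [removeCounts, List.foldl_append]

theorem map_removeCounts_step (p : List String) (u : String) (ls : List (List String)) :
    (ls.map (removeCounts p)).map (fun ml => ml.erase u) = ls.map (removeCounts (p ++ [u])) := by
  rw [List.map_map]
  exact List.map_congr_left fun ml _ => (removeCounts_append p u ml).symm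

theorem mem_sfx (ls : List (List String)) (p c : List String) :
    c ∈ sfx ls p ↔ ∃ t, c = p ++ t ∧ t ∈ fpc (ls.map (removeCounts p)) := by
  induction ls generalizing p c with
  | nil => simp [sfx, fpc]
  | cons l ls ih =>
      simp only [sfx, List.mem_flatMap, List.mem_filter, List.map_cons, fpc_cons,
        List.mem_map, decide_eq_true_eq]
      constructor
      · rintro ⟨u, ⟨hu, hcnt⟩, hc⟩
        rw [ih] at hc
        obtain ⟨t, rfl, ht⟩ := hc
        refine ⟨u :: t, by simp, ?_⟩
        refine ⟨u, ?_, ⟨t, ?_, rfl⟩⟩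
        · rw [← List.count_pos_iff, count_removeCounts]; omega
        · rw [map_removeCounts_step]; exact ht
      · rintro ⟨t, rfl, u, hu, t', ht', rfl⟩
        have hcnt : p.count u < l.count u := by
          rw [← List.count_pos_iff, count_removeCounts] at hu
          omega
        refine ⟨u, ⟨?_, hcnt⟩, ?_⟩
        · exact List.count_pos_iff.mp (by omega)
        · rw [ih]
          refine ⟨t', by simp, ?_⟩
          rw [map_removeCounts_step] at ht'
          exact ht' 

theorem foldl_bstep (ls : List (List String)) (acc : List (List String)) :
    ls.foldl bstep acc = acc.flatMap (fun p => sfx ls p) := by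
  induction ls generalizing acc with
  | nil => simp [sfx]
  | cons l ls ih =>
      rw [List.foldl_cons, ih]
      simp only [bstep, sfx, List.flatMap_assoc]
      congr 1
      funext p
      rw [List.flatMap_map]

theorem mem_bpart_iff_mem_fpc (ls : List (List String)) (c : List String) :
    c ∈ ls.foldl bstep [[]] ↔ c ∈ fpc ls := by
  rw [foldl_bstep]
  have hid : List.map (removeCounts []) ls = ls := by
    induction ls with
    | nil => rfl
    | cons l t iht => rw [List.map_cons, iht]; rfl
  simp [mem_sfx, hid]

theorem match_list_arr_eq (user_id banned_id : List String) :
    banned_id.foldl (fun acc bid =>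
      acc ++ [user_id.foldl (fun ml uid => if pymatch bid uid then ml ++ [uid] else ml) []]) []
    = banned_id.map (fun bid => user_id.filter (fun uid => pymatch bid uid)) := by
  have h : ∀ bid, user_id.foldl (fun ml uid => if pymatch bid uid then ml ++ [uid] else ml) []
      = user_id.filter (fun uid => pymatch bid uid) := by
    intro bid
    simpa using PySem.List.foldl_append_if (fun uid => pymatch bid uid) id user_id []
  simp only [h]
  simpa using PySem.List.foldl_append_singleton_eq_map
    (fun bid => user_id.filter (fun uid => pymatch bid uid)) banned_id []

theorem bfold_eq (user_id banned_id : List String) :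
    banned_id.foldl (fun part bid =>
      part.flatMap (fun p =>
        ((user_id.filter (fun uid => pymatch bid uid)).filter
          (fun u => p.count u < (user_id.filter (fun uid => pymatch bid uid)).count u)).map
          (fun u => p ++ [u]))) [[]]
    = (banned_id.map (fun bid => user_id.filter (fun uid => pymatch bid uid))).foldl bstep [[]] := by
  rw [List.foldl_map]
  rfl

theorem set_len_eq_of_mem_iff (xs ys : List (List String))
    (h : ∀ c, c ∈ xs ↔ c ∈ ys) :
    (PySem.Set.ofList (xs.map (fun c => PySem.List.sorted c (fun x => x) false))).length
    = (PySem.Set.ofList (ys.map (fun c => PySem.List.sorted c (fun x => x) false))).length := by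
  apply List.Perm.length_eq
  rw [List.perm_ext_iff_of_nodup (PySem.Set.nodup_ofList _) (PySem.Set.nodup_ofList _)]
  intro a
  simp only [PySem.Set.mem_ofList, List.mem_map]
  constructor <;> rintro ⟨c, hc, rfl⟩
  · exact ⟨c, (h c).mp hc, rfl⟩
  · exact ⟨c, (h c).mpr hc, rfl⟩

-- ===== VERDICT (by name: the statement is the Claim_ definition above) =====
theorem solution_spec : Claim_equal_solution := by
  intro user_id banned_id _
  unfold Spec_solution solution solution_alt
  simp only [match_list_arr_eq, bfold_eq]
  exact_mod_cast (set_len_eq_of_mem_iff _ _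
    (fun c => mem_bpart_iff_mem_fpc
      (banned_id.map (fun bid => user_id.filter (fun uid => pymatch bid uid))) c)).symm
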